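-- pv_equiv track=rewrite | github.com/evgeniy-kulikov/unified-state-exam | 02/task_02_02.py | fn
-- ===== SOURCE A (Python) =====
-- def fn(a):
--     for t in range(1, 1000):  # целых положительных t
--         for m in range(1, 1000):  # целых положительных m
--             f1 = 3 * t + 8 * m > 89
--             f2 = m < a and t <= a
--             if not (f1 or f2):
--                 return False
--     return True
-- ===== SOURCE B (Python) =====
-- def fn(a):
--     # closed form: the loop returns False iff some (t,m) with 3t+8m<=89
--     # violates (m<a and t<=a); the binding pairs are (1,10) and (27,1).
--     return 10 < a and 27 <= a
-- ===== Notes on version B (the rewrite author's own statement) =====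
-- stated objective: simpler
-- what changed: Replaced the 999x999 double loop with the closed-form condition 10 < a and 27 <= a derived from the feasible region of 3t+8m<=89 (extreme pairs (1,10) and (27,1)).
import Mathlib
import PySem

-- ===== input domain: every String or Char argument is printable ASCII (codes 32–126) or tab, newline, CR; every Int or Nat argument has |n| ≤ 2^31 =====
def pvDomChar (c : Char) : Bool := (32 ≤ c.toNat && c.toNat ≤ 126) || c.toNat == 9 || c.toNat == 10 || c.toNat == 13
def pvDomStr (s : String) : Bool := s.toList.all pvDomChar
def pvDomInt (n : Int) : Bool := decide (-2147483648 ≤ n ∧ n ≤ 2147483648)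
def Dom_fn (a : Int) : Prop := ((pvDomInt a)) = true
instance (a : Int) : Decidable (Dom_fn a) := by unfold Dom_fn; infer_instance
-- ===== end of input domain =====

-- B replaces the 999×999 double loop by the closed-form condition 10 < a ∧ 27 ≤ a (simpler).

-- ===== PORT A =====
-- inner loop over m: returns false as soon as 'not (f1 or f2)' (= Python's 'return False')
def fnInner (a t : Int) : List Int → Bool
  | [] => true
  | m :: ms =>
    let f1 : Bool := decide (3 * t + 8 * m > 89)
    let f2 : Bool := decide (m < a) && decide (t ≤ a)
    if !(f1 || f2) then false else fnInner a t ms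

-- outer loop over t: propagates the early 'return False'
def fnOuter (a : Int) : List Int → Bool
  | [] => true
  | t :: ts => if fnInner a t (PySem.List.pyRange 1 1000 1) then fnOuter a ts else false

def fn (a : Int) : Bool := fnOuter a (PySem.List.pyRange 1 1000 1)

-- ===== PORT B =====
def fn_alt (a : Int) : Bool := decide (10 < a) && decide (27 ≤ a)

-- ===== PRECONDITION & SPEC =====
def Spec_fn (a : Int) (out : Bool) : Prop := out = fn_alt a
instance (a : Int) (out : Bool) : Decidable (Spec_fn a out) := by unfold Spec_fn; infer_instance

-- ===== CLAIM (what is proved, stated in full; the proofs are below) =====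
def Claim_equal_fn : Prop := ∀ (a : Int), Dom_fn a → Spec_fn a (fn a)

-- ===== LEMMAS AND PROOFS =====

theorem fnInner_eq_all (a t : Int) (ms : List Int) :
    fnInner a t ms = ms.all (fun m => decide (3 * t + 8 * m > 89) || (decide (m < a) && decide (t ≤ a))) := by
  induction ms with
  | nil => rfl
  | cons m ms ih =>
    simp only [fnInner, List.all_cons, ih]
    cases h : (decide (3 * t + 8 * m > 89) || (decide (m < a) && decide (t ≤ a))) <;> simp

theorem fnOuter_eq_all (a : Int) (ts : List Int) :
    fnOuter a ts = ts.all (fun t => fnInner a t (PySem.List.pyRange 1 1000 1)) := by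
  induction ts with
  | nil => rfl
  | cons t ts ih =>
    simp only [fnOuter, List.all_cons, ih]
    cases h : fnInner a t (PySem.List.pyRange 1 1000 1) <;> simp

theorem fn_true_iff (a : Int) :
    fn a = true ↔ ∀ t ∈ PySem.List.pyRange 1 1000 1, ∀ m ∈ PySem.List.pyRange 1 1000 1,
      3 * t + 8 * m > 89 ∨ (m < a ∧ t ≤ a) := by
  simp only [fn, fnOuter_eq_all, fnInner_eq_all, List.all_eq_true]
  constructor
  · intro h t ht m hm
    have := h t ht m hm
    simpa [Bool.or_eq_true, Bool.and_eq_true, decide_eq_true_iff] using this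
  · intro h t ht m hm
    simpa [Bool.or_eq_true, Bool.and_eq_true, decide_eq_true_iff] using h t ht m hm

-- ===== VERDICT (by name: the statement is the Claim_ definition above) =====
theorem fn_spec : Claim_equal_fn := by
  intro a _
  show fn a = fn_alt a
  have hiff : fn a = true ↔ fn_alt a = true := by
    rw [fn_true_iff]
    simp only [fn_alt, Bool.and_eq_true, decide_eq_true_iff]
    constructor
    · intro h
      have h1 := h 1 (by rw [PySem.List.mem_pyRange_one]; omega) 10 (by rw [PySem.List.mem_pyRange_one]; omega)
      have h2 := h 27 (by rw [PySem.List.mem_pyRange_one]; omega) 1 (by rw [PySem.List.mem_pyRange_one]; omega)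
      constructor
      · rcases h1 with h1 | h1 <;> omega
      · rcases h2 with h2 | h2 <;> omega
    · intro ⟨h10, h27⟩ t ht m hm
      rw [PySem.List.mem_pyRange_one] at ht hm
      by_cases hbig : 3 * t + 8 * m > 89
      · exact Or.inl hbig
      · right; omega
  cases hA : fn a <;> cases hB : fn_alt a <;> simp_all
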